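-- pv_equiv track=rewrite | github.com/baskutty/Image-Processing-Lab | pract/7.py | corelation
-- ===== SOURCE A (Python) =====
-- def corelation (matrixC,matrixB,height,width,m):
--     matrixE = []
--     matrixA = []
--
--     if(m%2==1):
--         for i in range(0,height+m-1):
--             matrixA.append([])
--             for j in range(0,width+m-1):
--                 if (i<m/2 or j<m/2 or i>(height-1+m/2) or j>(width-1+m/2)):
--                     matrixA[i].append(0)
--                 else:
--                     x=matrixC[i-m//2][j-m//2]
--                     matrixA[i].append(x)
--
--
--         for i in range(0,height):
--             matrixE.append([])
--             for j in range(0,width):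
--                 sum=0
--                 for k in range(0,m):
--                     for l in range(0,m):
--                         sum=sum+matrixA[i+k][j+l]*matrixB[k][l]
--                 matrixE[i].append(sum)
--
--         return matrixE
-- ===== SOURCE B (Python) =====
-- def corelation(matrixC, matrixB, height, width, m):
--     # One fused pass: no padded intermediate matrix; for each output cell,
--     # accumulate products only over the in-range (non-padding) positions,
--     # using the same float-midpoint boundary test as the original.
--     if m % 2 == 1:
--         h = m // 2
--         matrixE = []
--         for i in range(height):
--             row = []
--             for j in range(width):
--                 s = 0
--                 for k in range(m):
--                     for l in range(m):
--                         if not (i + k < m / 2 or j + l < m / 2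
--                                 or i + k > height - 1 + m / 2
--                                 or j + l > width - 1 + m / 2):
--                             s = s + matrixC[i + k - h][j + l - h] * matrixB[k][l]
--                 row.append(s)
--             matrixE.append(row)
--         return matrixE
-- ===== Notes on version B (the rewrite author's own statement) =====
-- stated objective: simpler
-- what changed: B removes the padded intermediate matrixA entirely and computes each output cell in one fused pass, accumulating products only over in-range positions decided by the same boundary test A uses.
-- outside the precondition, e.g. on corelation([[1]], [[1]], 1, 1, 2): A returns None, B returns None
import Mathlib
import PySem

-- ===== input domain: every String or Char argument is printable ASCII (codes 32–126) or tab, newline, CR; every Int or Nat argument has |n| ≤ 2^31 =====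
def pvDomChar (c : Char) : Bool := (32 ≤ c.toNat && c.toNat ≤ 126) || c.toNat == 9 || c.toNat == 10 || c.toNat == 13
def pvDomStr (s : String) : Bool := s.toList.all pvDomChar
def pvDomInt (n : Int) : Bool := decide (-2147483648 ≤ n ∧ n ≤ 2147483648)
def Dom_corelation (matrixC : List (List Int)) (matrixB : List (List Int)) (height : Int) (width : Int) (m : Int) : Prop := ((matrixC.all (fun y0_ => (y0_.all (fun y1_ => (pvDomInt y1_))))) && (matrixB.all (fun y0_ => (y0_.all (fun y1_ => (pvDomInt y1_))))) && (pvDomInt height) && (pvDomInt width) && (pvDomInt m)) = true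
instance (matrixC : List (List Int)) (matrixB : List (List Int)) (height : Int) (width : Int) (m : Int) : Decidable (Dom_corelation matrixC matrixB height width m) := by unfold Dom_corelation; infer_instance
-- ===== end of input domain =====

-- B drops A's padded intermediate matrix and computes each output cell in one fused pass
-- (same boundary test, products only over in-range positions): a simpler decomposition, same result.

-- ===== PORT A =====
-- The float tests 'i < m/2' and 'i > height-1+m/2' are ported exactly as the integer
-- inequalities '2*i < m' and '2*(height-1)+m < 2*i' (exact for |m| ≤ 2^31: m/2 is an exact double).
-- Out-of-range indexing (an IndexError in Python) is rendered with pyGetD defaults; Pre_ excludes it.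
def corelation (matrixC : List (List Int)) (matrixB : List (List Int)) (height : Int) (width : Int) (m : Int) : List (List Int) :=
  if PySem.Int.mod m 2 = 1 then
    -- first loop nest: build the padded matrixA
    let matrixA : List (List Int) :=
      (PySem.List.pyRange 0 (height + m - 1)).map (fun i =>
        (PySem.List.pyRange 0 (width + m - 1)).map (fun j =>
          if 2*i < m ∨ 2*j < m ∨ 2*(height-1)+m < 2*i ∨ 2*(width-1)+m < 2*j then 0
          else PySem.List.pyGetD (PySem.List.pyGetD matrixC (i - PySem.Int.floordiv m 2) [])
                 (j - PySem.Int.floordiv m 2) 0))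
    -- second loop nest: correlate matrixA with matrixB
    (PySem.List.pyRange 0 height).map (fun i =>
      (PySem.List.pyRange 0 width).map (fun j =>
        (PySem.List.pyRange 0 m).foldl (fun s k =>
          (PySem.List.pyRange 0 m).foldl (fun s l =>
            s + PySem.List.pyGetD (PySem.List.pyGetD matrixA (i + k) []) (j + l) 0
              * PySem.List.pyGetD (PySem.List.pyGetD matrixB k []) l 0) s) 0))
  else []  -- Python falls through and returns None here; excluded by Pre_

-- ===== PORT B =====
def corelation_alt (matrixC : List (List Int)) (matrixB : List (List Int)) (height : Int) (width : Int) (m : Int) : List (List Int) :=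
  if PySem.Int.mod m 2 = 1 then
    let h := PySem.Int.floordiv m 2
    (PySem.List.pyRange 0 height).map (fun i =>
      (PySem.List.pyRange 0 width).map (fun j =>
        (PySem.List.pyRange 0 m).foldl (fun s k =>
          (PySem.List.pyRange 0 m).foldl (fun s l =>
            if 2*(i+k) < m ∨ 2*(j+l) < m ∨ 2*(height-1)+m < 2*(i+k) ∨ 2*(width-1)+m < 2*(j+l) then s
            else s + PySem.List.pyGetD (PySem.List.pyGetD matrixC (i + k - h) []) (j + l - h) 0
                   * PySem.List.pyGetD (PySem.List.pyGetD matrixB k []) l 0) s) 0))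
  else []  -- Python B likewise falls through (returns None) on even m; excluded by Pre_

-- ===== PRECONDITION & SPEC =====
-- Pre_ excludes even m, on which A falls through and returns None (not a list of ints), and the
-- inputs on which A's indexing of matrixC or matrixB raises IndexError; it admits exactly the
-- inputs on which A returns a list (rows [rlow, rmax] / cols up to cmax of matrixC are the only
-- cells A reads, and matrixB is read on [0,m) × [0,m) only when height, width, m are all ≥ 1).
def Pre_corelation (matrixC : List (List Int)) (matrixB : List (List Int)) (height : Int) (width : Int) (m : Int) : Prop :=
  PySem.Int.mod m 2 = 1 ∧
  (let h := PySem.Int.floordiv m 2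
   let rlow := max 1 (-h)
   let rmax := min (height - 1) (height + m - 2 - h)
   let cmax := min (width - 1) (width + m - 2 - h)
   (rlow ≤ rmax ∧ rlow ≤ cmax) →
     (rmax < (matrixC.length : Int) ∧
      ∀ r ∈ PySem.List.pyRange rlow (rmax + 1),
        cmax < ((PySem.List.pyGetD matrixC r []).length : Int))) ∧
  ((1 ≤ height ∧ 1 ≤ width ∧ 1 ≤ m) →
     (m ≤ (matrixB.length : Int) ∧
      ∀ r ∈ PySem.List.pyRange 0 m, m ≤ ((PySem.List.pyGetD matrixB r []).length : Int)))
instance (matrixC : List (List Int)) (matrixB : List (List Int)) (height : Int) (width : Int) (m : Int) : Decidable (Pre_corelation matrixC matrixB height width m) := by unfold Pre_corelation; infer_instance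

def pvWitness_corelation : List (List Int) × List (List Int) × Int × Int × Int :=
  ([[1, 2], [3, 4]], [[1]], 2, 2, 1)

def Spec_corelation (matrixC : List (List Int)) (matrixB : List (List Int)) (height : Int) (width : Int) (m : Int) (out : List (List Int)) : Prop := out = corelation_alt matrixC matrixB height width m
instance (matrixC : List (List Int)) (matrixB : List (List Int)) (height : Int) (width : Int) (m : Int) (out : List (List Int)) : Decidable (Spec_corelation matrixC matrixB height width m out) := by unfold Spec_corelation; infer_instance

-- ===== CLAIM (what is proved, stated in full; the proofs are below) =====
def Claim_equal_corelation : Prop := ∀ (matrixC : List (List Int)) (matrixB : List (List Int)) (height : Int) (width : Int) (m : Int), Dom_corelation matrixC matrixB height width m → Pre_corelation matrixC matrixB height width m → Spec_corelation matrixC matrixB height width m (corelation matrixC matrixB height width m)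

-- ===== LEMMAS AND PROOFS =====

-- Reading A's padded matrix at an in-range position (i+k, j+l) yields the padding expression
-- evaluated there.
theorem pv_matrixA_read (matrixC : List (List Int)) (height width m i j k l : Int)
    (hi : 0 ≤ i) (hi2 : i < height) (hk : 0 ≤ k) (hk2 : k < m)
    (hj : 0 ≤ j) (hj2 : j < width) (hl : 0 ≤ l) (hl2 : l < m) :
    PySem.List.pyGetD
      (PySem.List.pyGetD
        ((PySem.List.pyRange 0 (height + m - 1)).map (fun i2 =>
          (PySem.List.pyRange 0 (width + m - 1)).map (fun j2 =>
            if 2*i2 < m ∨ 2*j2 < m ∨ 2*(height-1)+m < 2*i2 ∨ 2*(width-1)+m < 2*j2 then 0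
            else PySem.List.pyGetD (PySem.List.pyGetD matrixC (i2 - PySem.Int.floordiv m 2) [])
                   (j2 - PySem.Int.floordiv m 2) 0)))
        (i + k) []) (j + l) 0
    = (if 2*(i+k) < m ∨ 2*(j+l) < m ∨ 2*(height-1)+m < 2*(i+k) ∨ 2*(width-1)+m < 2*(j+l) then 0
       else PySem.List.pyGetD (PySem.List.pyGetD matrixC (i + k - PySem.Int.floordiv m 2) [])
              (j + l - PySem.Int.floordiv m 2) 0) := by
  rw [PySem.List.pyGetD_map_pyRange_of_nonneg _ _ _ _ (by omega) (by omega),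
      PySem.List.pyGetD_map_pyRange_of_nonneg _ _ _ _ (by omega) (by omega)]

theorem pv_eq (matrixC : List (List Int)) (matrixB : List (List Int)) (height : Int) (width : Int) (m : Int) :
    corelation matrixC matrixB height width m = corelation_alt matrixC matrixB height width m := by
  unfold corelation corelation_alt
  by_cases hm : PySem.Int.mod m 2 = 1
  · simp only [if_pos hm]
    refine List.map_congr_left (fun i hi => ?_)
    refine List.map_congr_left (fun j hj => ?_)
    rw [PySem.List.mem_pyRange_one] at hi hj
    refine List.foldl_ext _ _ _ (fun s k hk => ?_)
    rw [PySem.List.mem_pyRange_one] at hk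
    refine List.foldl_ext _ _ _ (fun s' l hl => ?_)
    rw [PySem.List.mem_pyRange_one] at hl
    rw [pv_matrixA_read matrixC height width m i j k l
         hi.1 hi.2 hk.1 hk.2 hj.1 hj.2 hl.1 hl.2]
    split_ifs with hc
    · simp
    · rfl
  · simp only [if_neg hm]

-- ===== VERDICT (by name: the statement is the Claim_ definition above) =====
theorem corelation_spec : Claim_equal_corelation := by
  intro matrixC matrixB height width m _ _
  unfold Spec_corelation
  exact pv_eq matrixC matrixB height width m
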